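-- pv_equiv track=rewrite | github.com/isbkch/ai-security-scanner | ai_security_scanner/integrations/sarif/exporter.py | _extract_snippet_text
-- ===== SOURCE A (Python) =====
-- def _extract_snippet_text(code_snippet: str) -> str:
--     """Extract clean snippet text from formatted code snippet.
--
--     Args:
--         code_snippet: Formatted code snippet
--
--     Returns:
--         Clean snippet text
--     """
--     lines = code_snippet.split("\n")
--     clean_lines = []
--
--     for line in lines:
--         # Remove line number prefix (e.g., ">>> 123: " or "    123: ")
--         if ":" in line:
--             parts = line.split(":", 1)
--             if len(parts) == 2:
--                 clean_lines.append(parts[1])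
--             else:
--                 clean_lines.append(line)
--         else:
--             clean_lines.append(line)
--
--     return "\n".join(clean_lines)
-- ===== SOURCE B (Python) =====
-- import re
--
--
-- def _extract_snippet_text(code_snippet: str) -> str:
--     """Extract clean snippet text from formatted code snippet.
--
--     One regex substitution over the whole string: at each line start
--     ((?m)^), delete everything up to and including the first colon of
--     the line ([^:\n]*:); lines without a colon are left untouched.
--     """
--     return re.sub(r"(?m)^[^:\n]*:", "", code_snippet)
-- ===== Notes on version B (the rewrite author's own statement) =====
-- stated objective: idiomatic
-- what changed: The split-into-lines / per-line split(':',1) / append / join pipeline is replaced by a single multiline regex substitution re.sub(r'(?m)^[^:\n]*:', '', s) that deletes each line's prefix up to its first colon in one pass; no line list or per-line loop is maintained (Lean port: the character-level automaton this regex denotes).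
import Mathlib
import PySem

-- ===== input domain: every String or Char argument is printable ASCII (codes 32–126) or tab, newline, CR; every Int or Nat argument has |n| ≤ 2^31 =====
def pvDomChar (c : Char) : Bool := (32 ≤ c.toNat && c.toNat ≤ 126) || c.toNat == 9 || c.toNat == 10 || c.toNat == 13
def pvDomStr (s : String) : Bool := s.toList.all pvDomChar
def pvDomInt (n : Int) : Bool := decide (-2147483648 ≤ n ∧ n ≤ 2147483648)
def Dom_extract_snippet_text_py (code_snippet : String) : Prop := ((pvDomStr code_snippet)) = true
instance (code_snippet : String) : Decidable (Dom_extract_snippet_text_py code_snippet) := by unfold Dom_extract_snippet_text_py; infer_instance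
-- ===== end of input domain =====

-- B replaces A's split/per-line-loop/join pipeline with one regex substitution deleting each
-- line's first-colon prefix (objective: idiomatic); return values proved equal on all inputs.

-- ===== PORT A =====
def extract_snippet_text_py (code_snippet : String) : String :=
  -- lines = code_snippet.split("\n")
  let lines := PySem.Chars.splitOn code_snippet.toList ['\n']
  -- for line in lines: … clean_lines.append(…)
  let clean_lines := lines.foldl (fun acc line =>
    if PySem.Chars.isIn [':'] line then
      let parts := PySem.Chars.splitOnMax line [':'] 1
      if parts.length = 2 then acc ++ [PySem.List.pyGetD parts 1 []]
      else acc ++ [line]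
    else acc ++ [line]) []
  -- "\n".join(clean_lines)
  String.ofList (PySem.Chars.join ['\n'] clean_lines)

-- ===== PORT B =====
-- B is `re.sub(r"(?m)^[^:\n]*:", "", s)`. PySem has no regex engine, so the substitution is
-- ported by hand as the exact character automaton this regex denotes: at each line start
-- (pvSubSkip) the engine tries to match `[^:\n]*:` — buffering the candidate prefix and
-- discarding it when the colon arrives, flushing it on '\n' or end of input (failed match) —
-- and after a successful match copies the rest of the line verbatim (pvSubCopy).
mutual
/-- After the colon was deleted: copy characters until the next line start. -/
def pvSubCopy : List Char → List Char
  | [] => []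
  | c :: rest => if c = '\n' then '\n' :: pvSubSkip [] rest else c :: pvSubCopy rest
/-- At a line start, matching `[^:\n]*:` with the candidate prefix buffered in `buf`. -/
def pvSubSkip (buf : List Char) : List Char → List Char
  | [] => buf
  | c :: rest =>
    if c = ':' then pvSubCopy rest
    else if c = '\n' then buf ++ '\n' :: pvSubSkip [] rest
    else pvSubSkip (buf ++ [c]) rest
end

def extract_snippet_text_py_alt (code_snippet : String) : String :=
  String.ofList (pvSubSkip [] code_snippet.toList)

-- ===== PRECONDITION & SPEC =====
def Spec_extract_snippet_text_py (code_snippet : String) (out : String) : Prop := out = extract_snippet_text_py_alt code_snippet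
instance (code_snippet : String) (out : String) : Decidable (Spec_extract_snippet_text_py code_snippet out) := by unfold Spec_extract_snippet_text_py; infer_instance

-- ===== CLAIM (what is proved, stated in full; the proofs are below) =====
def Claim_equal_extract_snippet_text_py : Prop := ∀ (code_snippet : String), Dom_extract_snippet_text_py code_snippet → Spec_extract_snippet_text_py code_snippet (extract_snippet_text_py code_snippet)

-- ===== LEMMAS AND PROOFS =====

/-- Structural one-character split on '\n': (first line, remaining lines). -/
def pvSp : List Char → List Char × List (List Char)
  | [] => ([], [])
  | c :: cs =>
    let p := pvSp cs
    if c = '\n' then ([], p.1 :: p.2) else (c :: p.1, p.2)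

/-- What A does to one line: drop everything up to and including the first ':', if any. -/
def pvClean (l : List Char) : List Char :=
  if ':' ∈ l then (l.dropWhile (· ≠ ':')).tail else l

/-- Cleaned continuation lines, each preceded by the '\n' separator. -/
def pvFlat (t : List (List Char)) : List Char :=
  (t.map (fun l => '\n' :: pvClean l)).flatten

theorem pvSplitOn_go_eq (fuel : Nat) (l cur : List Char) (acc : List (List Char))
    (h : l.length ≤ fuel) :
    PySem.Chars.splitOn.go ['\n'] fuel l cur acc
      = acc.reverse ++ ((cur.reverse ++ (pvSp l).1) :: (pvSp l).2) := by
  induction fuel generalizing l cur acc with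
  | zero =>
    cases l with
    | nil => simp [PySem.Chars.splitOn.go, pvSp]
    | cons c rest => simp at h
  | succ fuel ih =>
    cases l with
    | nil => simp [PySem.Chars.splitOn.go, pvSp]
    | cons c rest =>
      simp only [PySem.Chars.splitOn.go]
      by_cases hc : c = '\n'
      · subst hc
        rw [if_pos (by simp [List.isPrefixOf])]
        rw [ih _ _ _ (by simpa using Nat.le_of_succ_le_succ h)]
        simp [pvSp]
      · rw [if_neg (by simp [List.isPrefixOf]; exact fun e => hc e.symm)]
        rw [ih _ _ _ (by simpa using Nat.le_of_succ_le_succ h)]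
        simp [pvSp, hc]

theorem pvSplitOn_eq (l : List Char) :
    PySem.Chars.splitOn l ['\n'] = (pvSp l).1 :: (pvSp l).2 := by
  rw [PySem.Chars.splitOn, pvSplitOn_go_eq _ _ _ _ (Nat.le_succ _)]
  simp

theorem pvSplitOnMax_go_eq (fuel : Nat) (l cur : List Char) (acc : List (List Char))
    (h : l.length ≤ fuel) :
    PySem.Chars.splitOnMax.go [':'] fuel 1 l cur acc
      = acc.reverse ++
        (if ':' ∈ l then
          [cur.reverse ++ l.takeWhile (· ≠ ':'), (l.dropWhile (· ≠ ':')).tail]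
        else [cur.reverse ++ l]) := by
  induction fuel generalizing l cur acc with
  | zero =>
    cases l with
    | nil => simp [PySem.Chars.splitOnMax.go]
    | cons c rest => simp at h
  | succ fuel ih =>
    cases l with
    | nil => simp [PySem.Chars.splitOnMax.go]
    | cons c rest =>
      simp only [PySem.Chars.splitOnMax.go]
      rw [if_neg (by omega)]
      by_cases hc : c = ':'
      · subst hc
        rw [if_pos (by simp [List.isPrefixOf])]
        have hz : ∀ (l cur' : List Char) (acc' : List (List Char)),
            PySem.Chars.splitOnMax.go [':'] fuel 0 l cur' acc'
              = ((cur'.reverse ++ l) :: acc').reverse := by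
          intro l cur' acc'
          cases fuel with
          | zero => cases l <;> simp [PySem.Chars.splitOnMax.go]
          | succ fuel => cases l <;> simp [PySem.Chars.splitOnMax.go]
        rw [hz]
        simp [List.takeWhile, List.dropWhile]
      · rw [if_neg (by simp [List.isPrefixOf]; exact fun e => hc e.symm)]
        rw [ih _ _ _ (by simpa using Nat.le_of_succ_le_succ h)]
        have hne : (c ≠ ':') = True := by simp [hc]
        by_cases hm : ':' ∈ rest
        · simp [hm, hne]
        · simp [hm, hne, Ne.symm]

theorem pvSplitOnMax_eq (l : List Char) (h : ':' ∈ l) :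
    PySem.Chars.splitOnMax l [':'] 1
      = [l.takeWhile (· ≠ ':'), (l.dropWhile (· ≠ ':')).tail] := by
  rw [PySem.Chars.splitOnMax, if_neg (by omega)]
  rw [show (1 : Int).toNat = 1 from rfl, pvSplitOnMax_go_eq _ _ _ _ (Nat.le_succ _)]
  simp [h]

theorem pvIsIn_colon (l : List Char) : PySem.Chars.isIn [':'] l = decide (':' ∈ l) := by
  by_cases h : ':' ∈ l
  · simp only [h, decide_true]
    rw [PySem.Chars.isIn_iff_infix]
    obtain ⟨s, t, rfl⟩ := List.append_of_mem h
    exact ⟨s, t, by simp⟩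
  · simp only [h, decide_false]
    rw [PySem.Chars.isIn_eq_false_iff]
    intro hinf
    exact h (hinf.subset (by simp))

theorem pvJoin_eq (h : List Char) (t : List (List Char)) :
    PySem.Chars.join ['\n'] (h :: t.map pvClean) = h ++ pvFlat t := by
  induction t generalizing h with
  | nil => simp [PySem.Chars.join_singleton, pvFlat]
  | cons x t ih =>
    rw [List.map_cons, PySem.Chars.join_cons_cons, ih]
    simp [pvFlat]

theorem pvClean_of_not_mem {buf : List Char} (h : ':' ∉ buf) : pvClean buf = buf := by
  simp [pvClean, h]

theorem pvClean_append_colon (buf x : List Char) (h : ':' ∉ buf) :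
    pvClean (buf ++ ':' :: x) = x := by
  rw [pvClean, if_pos (by simp)]
  induction buf with
  | nil =>
    rw [List.nil_append, List.dropWhile_cons, if_neg (by simp)]
    rfl
  | cons b bs ih =>
    simp only [List.mem_cons, not_or] at h
    rw [List.cons_append, List.dropWhile_cons, if_pos (by simp [Ne.symm h.1])]
    exact ih h.2

/-- Joint invariant of the two automaton states against the split-clean-join spec. -/
theorem pvAutomaton (cs : List Char) :
    (pvSubCopy cs = (pvSp cs).1 ++ pvFlat (pvSp cs).2) ∧
    (∀ buf, ':' ∉ buf → '\n' ∉ buf →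
      pvSubSkip buf cs = pvClean (buf ++ (pvSp cs).1) ++ pvFlat (pvSp cs).2) := by
  induction cs with
  | nil =>
    refine ⟨by simp [pvSubCopy, pvSp, pvFlat], ?_⟩
    intro buf h1 _
    simp [pvSubSkip, pvSp, pvFlat, pvClean_of_not_mem h1]
  | cons c cs ih =>
    constructor
    · by_cases hc : c = '\n'
      · subst hc
        rw [pvSubCopy, if_pos rfl, ih.2 [] (by simp) (by simp)]
        simp [pvSp, pvFlat]
      · rw [pvSubCopy, if_neg hc, ih.1]
        simp [pvSp, hc]
    · intro buf h1 h2
      by_cases hc : c = ':'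
      · subst hc
        rw [pvSubSkip, if_pos rfl, ih.1]
        simp [pvSp, pvClean_append_colon _ _ h1]

      · by_cases hn : c = '\n'
        · subst hn
          rw [pvSubSkip, if_neg hc, if_pos rfl, ih.2 [] (by simp) (by simp)]
          simp [pvSp, pvFlat, pvClean_of_not_mem h1]
        · rw [pvSubSkip, if_neg hc, if_neg hn,
            ih.2 (buf ++ [c]) (by simp [h1]; exact fun e => hc e.symm)
              (by simp [h2]; exact fun e => hn e.symm)]
          simp [pvSp, hn]

-- ===== VERDICT (by name: the statement is the Claim_ definition above) =====
theorem extract_snippet_text_py_spec : Claim_equal_extract_snippet_text_py := by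
  intro s _
  unfold Spec_extract_snippet_text_py extract_snippet_text_py extract_snippet_text_py_alt
  have hbody : ∀ (acc : List (List Char)) (line : List Char),
      (if PySem.Chars.isIn [':'] line then
        let parts := PySem.Chars.splitOnMax line [':'] 1
        if parts.length = 2 then acc ++ [PySem.List.pyGetD parts 1 []]
        else acc ++ [line]
      else acc ++ [line]) = acc ++ [pvClean line] := by
    intro acc line
    rw [pvIsIn_colon]
    by_cases h : ':' ∈ line
    · simp only [h, decide_true, if_true]
      rw [pvSplitOnMax_eq line h]
      simp [PySem.List.pyGetD, PySem.List.pyIdx?, PySem.List.pyGet?, pvClean, h]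
    · simp [h, pvClean]
  simp only [hbody]
  rw [PySem.List.foldl_append_singleton_eq_map, List.nil_append, pvSplitOn_eq]
  rw [List.map_cons, pvJoin_eq]
  rw [(pvAutomaton s.toList).2 [] (by simp) (by simp)]
  simp
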